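-- pv_equiv track=rewrite | github.com/theycallmemax/agentx-tau2-purple | src/intent.py | looks_like_affirmation
-- ===== SOURCE A (Python) =====
-- def looks_like_affirmation(text: str) -> bool:
--     lowered = text.lower()
--     return any(
--         phrase in lowered
--         for phrase in (
--             "yes",
--             "go ahead",
--             "please proceed",
--             "proceed with",
--             "do it",
--             "confirm",
--         )
--     )
-- ===== SOURCE B (Python) =====
-- PHRASES = ("yes", "go ahead", "please proceed", "proceed with", "do it", "confirm")
--
--
-- def looks_like_affirmation(text: str) -> bool:
--     lowered = text.lower()
--     for i in range(len(lowered)):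
--         if any(lowered.startswith(phrase, i) for phrase in PHRASES):
--             return True
--     return False
-- ===== Notes on version B (the rewrite author's own statement) =====
-- stated objective: alternative
-- what changed: Replaces six independent whole-text substring scans (one membership test per phrase) by a single left-to-right sweep over the lowered text that at each position checks whether any of the six phrases starts there.
import Mathlib
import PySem

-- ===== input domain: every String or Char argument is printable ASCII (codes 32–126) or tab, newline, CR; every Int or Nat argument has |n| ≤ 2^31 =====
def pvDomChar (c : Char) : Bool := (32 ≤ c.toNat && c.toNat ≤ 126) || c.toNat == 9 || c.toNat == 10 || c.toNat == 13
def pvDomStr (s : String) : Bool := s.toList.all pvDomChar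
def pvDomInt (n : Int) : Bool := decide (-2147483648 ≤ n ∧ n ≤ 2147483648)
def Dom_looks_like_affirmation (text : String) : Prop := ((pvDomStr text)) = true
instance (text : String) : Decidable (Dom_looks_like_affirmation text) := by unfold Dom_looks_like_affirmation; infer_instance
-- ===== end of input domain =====

-- B does one left-to-right sweep over the lowered text, checking at each position whether
-- any phrase starts there, instead of A's six independent substring scans (alternative algorithm, same result).

-- ===== PORT A =====
-- the six affirmation phrases, in A's tuple order
def pvPhrases : List String :=
  ["yes", "go ahead", "please proceed", "proceed with", "do it", "confirm"]

def looks_like_affirmation (text : String) : Bool :=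
  let lowered := PySem.Str.lower text
  pvPhrases.any (fun phrase => PySem.Str.isIn phrase lowered)

-- ===== PORT B =====
-- the same six phrases, as char lists (Source B's module-level PHRASES)
def pvPhrasesB : List (List Char) :=
  ["yes".toList, "go ahead".toList, "please proceed".toList,
   "proceed with".toList, "do it".toList, "confirm".toList]

-- Source B's loop 'for i in range(len(lowered)): if any(lowered.startswith(p, i)): return True'
-- as structural recursion on the suffix lowered[i:]
def pvScan (phrases : List (List Char)) : List Char → Bool
  | [] => false
  | c :: rest =>
      phrases.any (fun p => PySem.Chars.startswith (c :: rest) p) || pvScan phrases rest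

def looks_like_affirmation_alt (text : String) : Bool :=
  pvScan pvPhrasesB (PySem.Chars.lower text.toList)

-- ===== PRECONDITION & SPEC =====
def Spec_looks_like_affirmation (text : String) (out : Bool) : Prop := out = looks_like_affirmation_alt text
instance (text : String) (out : Bool) : Decidable (Spec_looks_like_affirmation text out) := by unfold Spec_looks_like_affirmation; infer_instance

-- ===== CLAIM (what is proved, stated in full; the proofs are below) =====
def Claim_equal_looks_like_affirmation : Prop := ∀ (text : String), Dom_looks_like_affirmation text → Spec_looks_like_affirmation text (looks_like_affirmation text)

-- ===== LEMMAS AND PROOFS =====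

-- the sweep finds a phrase iff some phrase is an infix (phrases must be nonempty, as ours are)
theorem pvScan_eq_true_iff (phrases : List (List Char)) (h : ∀ p ∈ phrases, p ≠ [])
    (s : List Char) : pvScan phrases s = true ↔ ∃ p ∈ phrases, p <:+: s := by
  induction s with
  | nil =>
      simp only [pvScan]
      constructor
      · intro hx; simp at hx
      · rintro ⟨p, hp, hinf⟩
        exact absurd (List.eq_nil_of_infix_nil hinf) (h p hp)
  | cons c rest ih =>
      simp only [pvScan, Bool.or_eq_true, List.any_eq_true, ih]
      constructor
      · rintro (⟨p, hp, hsw⟩ | ⟨p, hp, hinf⟩)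
        · exact ⟨p, hp, ((PySem.Chars.startswith_iff _ _).mp hsw).isInfix⟩
        · exact ⟨p, hp, List.infix_cons_iff.mpr (Or.inr hinf)⟩
      · rintro ⟨p, hp, hinf⟩
        rcases List.infix_cons_iff.mp hinf with hpre | hinf'
        · exact Or.inl ⟨p, hp, (PySem.Chars.startswith_iff _ _).mpr hpre⟩
        · exact Or.inr ⟨p, hp, hinf'⟩

-- ===== VERDICT (by name: the statement is the Claim_ definition above) =====
theorem looks_like_affirmation_spec : Claim_equal_looks_like_affirmation := by
  intro text _
  unfold Spec_looks_like_affirmation looks_like_affirmation looks_like_affirmation_alt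
  have hne : ∀ p ∈ pvPhrasesB, p ≠ [] := by decide
  have hscan := pvScan_eq_true_iff pvPhrasesB hne (PySem.Chars.lower text.toList)
  rcases hb : pvScan pvPhrasesB (PySem.Chars.lower text.toList) with _ | _
  · simp only [List.any_eq_false]
    intro phrase hphrase hin
    rw [PySem.Str.isIn_iff_infix] at hin
    have : ∃ p ∈ pvPhrasesB, p <:+: PySem.Chars.lower text.toList := by
      refine ⟨phrase.toList, ?_, ?_⟩
      · fin_cases hphrase <;> simp [pvPhrasesB]
      · simpa [PySem.Str.lower] using hin
    rw [← hscan] at this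
    simp [hb] at this
  · rcases hscan.mp hb with ⟨p, hp, hinf⟩
    simp only [List.any_eq_true]
    have hmap : ∀ p ∈ pvPhrasesB, ∃ q ∈ pvPhrases, q.toList = p := by decide
    obtain ⟨q, hq, hql⟩ := hmap p hp
    refine ⟨q, hq, ?_⟩
    rw [PySem.Str.isIn_iff_infix]
    simpa [pysem, hql] using hinf
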